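-- pv_equiv track=rewrite | github.com/jonesrussell/indigenous-harvesters | notebooks/scrape_province_emails.py | pick_best_email
-- ===== SOURCE A (Python) =====
-- def pick_best_email(emails: list[str]) -> str:
--     if not emails:
--         return ""
--     for prefix in ["info@", "contact@", "reception@", "admin@", "office@", "general@", "band@"]:
--         for e in emails:
--             if e.startswith(prefix):
--                 return e
--     return emails[0]
-- ===== SOURCE B (Python) =====
-- _PREFIXES = ["info@", "contact@", "reception@", "admin@", "office@", "general@", "band@"]
-- _RANK = {p: i for i, p in enumerate(_PREFIXES)}
--
-- def pick_best_email(emails: list[str]) -> str: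
--     if not emails:
--         return ""
--     best_rank = len(_PREFIXES)  # 7 = worse than any real rank
--     best_email = None
--     for e in emails:
--         for p, r in _RANK.items():
--             if e.startswith(p):
--                 if r < best_rank:
--                     best_rank = r
--                     best_email = e
--                 break
--     return best_email if best_email is not None else emails[0]
-- ===== Notes on version B (the rewrite author's own statement) =====
-- stated objective: alternative
-- what changed: Replaces A's prefix-major nested rescan of the whole email list per prefix with a single pass over the emails tracking (best_rank, best_email) via a prefix->rank table, with strict comparison so the earliest email of minimal rank wins; same cost, different traversal.
import Mathlib
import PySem

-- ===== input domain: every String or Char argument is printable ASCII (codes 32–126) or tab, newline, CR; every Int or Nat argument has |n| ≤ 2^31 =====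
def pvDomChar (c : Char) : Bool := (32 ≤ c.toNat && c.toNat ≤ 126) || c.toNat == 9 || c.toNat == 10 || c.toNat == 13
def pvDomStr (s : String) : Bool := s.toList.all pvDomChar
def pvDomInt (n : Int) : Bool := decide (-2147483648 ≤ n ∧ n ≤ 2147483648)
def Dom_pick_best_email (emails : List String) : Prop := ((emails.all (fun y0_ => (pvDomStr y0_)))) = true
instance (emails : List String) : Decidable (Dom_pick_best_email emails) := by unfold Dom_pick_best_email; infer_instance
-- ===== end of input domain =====

-- B replaces A's prefix-major rescan of the email list per prefix with a single pass over the
-- emails tracking (best_rank, best_email) through a prefix→rank table; same return value.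

-- ===== PORT A =====
def pvPrefixes : List String :=
  ["info@", "contact@", "reception@", "admin@", "office@", "general@", "band@"]

-- inner loop: 'for e in emails: if e.startswith(prefix): return e'
def pvAInner (p : String) : List String → Option String
  | [] => none
  | e :: es => if PySem.Str.startswith e p then some e else pvAInner p es

-- outer loop over the prefixes, returning at the first prefix with a match
def pvAOuter : List String → List String → Option String
  | [], _ => none
  | p :: ps, emails =>
    match pvAInner p emails with
    | some e => some e
    | none => pvAOuter ps emails

def pick_best_email (emails : List String) : String :=
  if emails = [] then ""
  else
    match pvAOuter pvPrefixes emails with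
    | some e => e
    | none => (PySem.List.pyGet? emails 0).getD ""  -- emails[0]; guard ensures index 0 exists

-- ===== PORT B =====
-- _RANK.items(): each prefix paired with its priority rank
def pvRankItems : List (String × Int) :=
  [("info@", 0), ("contact@", 1), ("reception@", 2), ("admin@", 3),
   ("office@", 4), ("general@", 5), ("band@", 6)]

-- inner 'for p, r in _RANK.items(): if e.startswith(p): … break'
def pvRankOf : List (String × Int) → String → Option Int
  | [], _ => none
  | (p, r) :: rest, e => if PySem.Str.startswith e p then some r else pvRankOf rest e

-- one step of the single pass: update (best_rank, best_email) when strictly better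
def pvStep (st : Int × Option String) (e : String) : Int × Option String :=
  match pvRankOf pvRankItems e with
  | some r => if r < st.1 then (r, some e) else st
  | none => st

def pick_best_email_alt (emails : List String) : String :=
  if emails = [] then ""
  else
    match (emails.foldl pvStep (7, none)).2 with
    | some e => e
    | none => (PySem.List.pyGet? emails 0).getD ""  -- emails[0]; guard ensures index 0 exists

-- ===== PRECONDITION & SPEC =====
def Spec_pick_best_email (emails : List String) (out : String) : Prop := out = pick_best_email_alt emails
instance (emails : List String) (out : String) : Decidable (Spec_pick_best_email emails out) := by unfold Spec_pick_best_email; infer_instance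

-- ===== CLAIM (what is proved, stated in full; the proofs are below) =====
def Claim_equal_pick_best_email : Prop := ∀ (emails : List String), Dom_pick_best_email emails → Spec_pick_best_email emails (pick_best_email emails)

-- ===== LEMMAS AND PROOFS =====

-- rank of an email: index of the first matching prefix (= length 7 if none matches)
def pvM (ps : List String) (e : String) : Nat :=
  ps.findIdx (fun p => PySem.Str.startswith e p)

def pvOr (a b : Option String) : Option String :=
  match a with
  | some x => some x
  | none => b

-- 'first email of strictly smallest rank below r', written front-to-back
def pvBest (ps : List String) : Nat → List String → Option String
  | _, [] => none
  | r, e :: es => if pvM ps e < r then pvOr (pvBest ps (pvM ps e) es) (some e) else pvBest ps r es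

lemma pvOr_none (a : Option String) : pvOr a none = a := by
  cases a <;> rfl

lemma pvOr_some (a : Option String) (e : String) (b : Option String) :
    pvOr (pvOr a (some e)) b = pvOr a (some e) := by
  cases a <;> rfl

lemma pvOr_assoc (a b c : Option String) : pvOr (pvOr a b) c = pvOr a (pvOr b c) := by
  cases a <;> rfl

lemma pvBest_zero (ps : List String) (es : List String) : pvBest ps 0 es = none := by
  induction es with
  | nil => rfl
  | cons e es ih => simp [pvBest, ih]

lemma pvM_cons (p : String) (ps : List String) (e : String) :
    pvM (p :: ps) e = if PySem.Str.startswith e p then 0 else pvM ps e + 1 := by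
  simp [pvM, List.findIdx_cons]

lemma pvBest_cons_char (p : String) (ps : List String) :
    ∀ (es : List String) (r : Nat),
      pvBest (p :: ps) (r + 1) es = pvOr (pvAInner p es) (pvBest ps r es) := by
  intro es
  induction es with
  | nil => intro r; rfl
  | cons e es ih =>
    intro r
    cases hp : PySem.Chars.startswith e.toList p.toList
    · have hm : pvM (p :: ps) e = pvM ps e + 1 := by simp [pvM_cons, hp]
      by_cases hr : pvM ps e < r
      · have h1 : pvM ps e + 1 < r + 1 := by omega
        simp [pvBest, pvAInner, hm, hp, h1, hr, ih (pvM ps e), pvOr_assoc]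
      · have h1 : ¬ (pvM ps e + 1 < r + 1) := by omega
        simp [pvBest, pvAInner, hm, hp, h1, hr, ih r]
    · have hm : pvM (p :: ps) e = 0 := by simp [pvM_cons, hp]
      simp [pvBest, pvAInner, hm, hp, pvBest_zero, pvOr]

lemma pvAOuter_eq : ∀ (ps emails : List String),
    pvAOuter ps emails = pvBest ps ps.length emails := by
  intro ps
  induction ps with
  | nil => intro emails; simp [pvAOuter, List.length_nil, pvBest_zero]
  | cons p ps ih =>
    intro emails
    have h := pvBest_cons_char p ps emails ps.length
    rw [pvAOuter, ih emails]
    cases hin : pvAInner p emails <;>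
      simp [List.length_cons, h, hin, pvOr]

lemma pvRankOf_eq (e : String) :
    pvRankOf pvRankItems e =
      if pvM pvPrefixes e < 7 then some ((pvM pvPrefixes e : Nat) : Int) else none := by
  simp only [pvRankItems, pvRankOf, pvPrefixes, pvM, List.findIdx_cons, List.findIdx_nil]
  split_ifs <;> simp_all

lemma pvFold_char : ∀ (es : List String) (r : Nat) (acc : Option String), r ≤ 7 →
    (es.foldl pvStep ((r : Int), acc)).2 = pvOr (pvBest pvPrefixes r es) acc := by
  intro es
  induction es with
  | nil => intro r acc _; simp [pvBest, pvOr]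
  | cons e es ih =>
    intro r acc hr
    rw [List.foldl_cons]
    by_cases hm : pvM pvPrefixes e < 7
    · have hstep : pvStep ((r : Int), acc) e =
          if ((pvM pvPrefixes e : Nat) : Int) < (r : Int)
          then (((pvM pvPrefixes e : Nat) : Int), some e) else ((r : Int), acc) := by
        simp [pvStep, pvRankOf_eq, hm]
      by_cases hlt : pvM pvPrefixes e < r
      · rw [hstep, if_pos (by exact_mod_cast hlt)]
        rw [ih (pvM pvPrefixes e) (some e) (by omega)]
        simp [pvBest, hlt, pvOr_some]
      · rw [hstep, if_neg (by exact_mod_cast hlt)]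
        rw [ih r acc hr]
        simp [pvBest, hlt]
    · have hstep : pvStep ((r : Int), acc) e = ((r : Int), acc) := by
        simp [pvStep, pvRankOf_eq, hm]
      rw [hstep, ih r acc hr]
      have : ¬ pvM pvPrefixes e < r := by omega
      simp [pvBest, this]

-- ===== VERDICT (by name: the statement is the Claim_ definition above) =====
theorem pick_best_email_spec : Claim_equal_pick_best_email := by
  intro emails _
  unfold Spec_pick_best_email pick_best_email pick_best_email_alt
  by_cases hne : emails = []
  · simp [hne]
  · have hfold : (emails.foldl pvStep (7, none)).2 = pvBest pvPrefixes 7 emails := by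
      have h := pvFold_char emails 7 none (by omega)
      simpa [pvOr_none] using h
    have houter : pvAOuter pvPrefixes emails = pvBest pvPrefixes 7 emails := by
      simpa [pvPrefixes] using pvAOuter_eq pvPrefixes emails
    simp [hne, hfold, houter]
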